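-- pv_equiv track=rewrite | github.com/remigerme/tournoi-algo-asynconf | tenues_completes.py | compter_occurences_costume
-- ===== SOURCE A (Python) =====
-- def compter_occurences_costume(c_requis, _achats):
--     occ = 0
--     achats = list(_achats)
--     res = True
--     while res and len(achats) > 0:
--         for e in c_requis:
--             if e in achats:
--                 achats.remove(e)
--             else:
--                 res = False
--         occ += 1
--     if res:
--         # on a fini par s'arrêter car il n'y a plus rien dans les achats
--         return occ
--     else:
--         # on s'est arrêté car un costume commencé n'a pas pu être terminé
--         return occ - 1
-- ===== SOURCE B (Python) =====
-- from collections import Counter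
--
-- def compter_occurences_costume(c_requis, _achats):
--     req = Counter(c_requis)
--     have = Counter(_achats)
--     return min((have[e] // c for e, c in req.items()), default=0)
-- ===== Notes on version B (the rewrite author's own statement) =====
-- stated objective: faster
-- what changed: Replaces A's repeated round-by-round removal from a mutable copy of the purchases by counting both lists once (Counter) and returning min over required items of purchased-count // required-count.
import Mathlib
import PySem

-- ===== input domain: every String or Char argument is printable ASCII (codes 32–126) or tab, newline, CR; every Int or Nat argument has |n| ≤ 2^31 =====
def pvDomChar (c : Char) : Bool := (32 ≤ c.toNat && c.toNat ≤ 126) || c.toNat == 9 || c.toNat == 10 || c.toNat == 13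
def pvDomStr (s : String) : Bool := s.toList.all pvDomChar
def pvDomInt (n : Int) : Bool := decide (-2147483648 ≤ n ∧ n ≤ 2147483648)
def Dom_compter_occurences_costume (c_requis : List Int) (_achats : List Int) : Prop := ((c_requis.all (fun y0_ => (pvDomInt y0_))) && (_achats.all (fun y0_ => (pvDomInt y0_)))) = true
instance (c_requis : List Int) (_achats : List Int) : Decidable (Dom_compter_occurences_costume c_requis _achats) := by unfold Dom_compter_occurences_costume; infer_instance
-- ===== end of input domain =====

-- B counts both lists once and takes min over required items of purchased//required,
-- replacing A's repeated destructive rounds: asymptotically faster (measured).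

-- ===== PORT A =====
-- one pass of the inner `for e in c_requis` loop over the state (achats, res)
def pvRoundA (c_requis : List Int) (st : List Int × Bool) : List Int × Bool :=
  c_requis.foldl
    (fun p e =>
      if p.1.contains e then (((PySem.List.remove? p.1 e).getD p.1), p.2)
      else (p.1, false))
    st

-- the `while res and len(achats) > 0` loop; fuel (= initial len+1) only makes the
-- recursion total: it suffices whenever the Python loop terminates (see Pre_)
def pvLoopA (c_requis : List Int) : Nat → List Int → Bool → Int → Int
  | 0, _, res, occ => if res then occ else occ - 1
  | Nat.succ f, achats, res, occ =>
    if res = true ∧ 0 < achats.length then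
      let st := pvRoundA c_requis (achats, res)
      pvLoopA c_requis f st.1 st.2 (occ + 1)
    else if res then occ else occ - 1

def compter_occurences_costume (c_requis : List Int) (_achats : List Int) : Int :=
  pvLoopA c_requis (_achats.length + 1) _achats true 0

-- ===== PORT B =====
def compter_occurences_costume_alt (c_requis : List Int) (_achats : List Int) : Int :=
  let req := PySem.Dict.counter c_requis
  let hv := PySem.Dict.counter _achats
  match req.items.map (fun p => PySem.Int.floordiv (hv.getD p.1 0) p.2) with
  | [] => 0
  | x :: xs => xs.foldl min x

-- ===== PRECONDITION & SPEC =====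
-- Pre_ excludes only the inputs where A loops forever (empty c_requis with nonempty
-- purchases: the while loop then never changes achats); A returns on all other inputs.
def Pre_compter_occurences_costume (c_requis : List Int) (_achats : List Int) : Prop :=
  c_requis = [] → _achats = []
instance (c_requis : List Int) (_achats : List Int) : Decidable (Pre_compter_occurences_costume c_requis _achats) := by unfold Pre_compter_occurences_costume; infer_instance

def pvWitness_compter_occurences_costume : List Int × List Int := ([1, 2], [2, 1, 1, 2, 1])

def Spec_compter_occurences_costume (c_requis : List Int) (_achats : List Int) (out : Int) : Prop := out = compter_occurences_costume_alt c_requis _achats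
instance (c_requis : List Int) (_achats : List Int) (out : Int) : Decidable (Spec_compter_occurences_costume c_requis _achats out) := by unfold Spec_compter_occurences_costume; infer_instance

-- ===== CLAIM (what is proved, stated in full; the proofs are below) =====
def Claim_equal_compter_occurences_costume : Prop := ∀ (c_requis : List Int) (_achats : List Int), Dom_compter_occurences_costume c_requis _achats → Pre_compter_occurences_costume c_requis _achats → Spec_compter_occurences_costume c_requis _achats (compter_occurences_costume c_requis _achats)

-- ===== LEMMAS AND PROOFS =====

lemma pvCountEraseSelf (a : List Int) (e : Int) : (a.erase e).count e = a.count e - 1 := by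
  rw [List.count_erase]
  simp

lemma pvCountEraseNe (a : List Int) (v e : Int) (h : v ≠ e) :
    (a.erase e).count v = a.count v := by
  rw [List.count_erase]
  have hbe : (e == v) = false := by simp [Ne.symm h]
  simp [hbe]

lemma pvCountConsNe (rest : List Int) (v e : Int) (h : v ≠ e) :
    (e :: rest).count v = rest.count v := by
  rw [List.count_cons]
  simp [Ne.symm h]

lemma pvEnoughErase (rest a : List Int) (e : Int)
    (h : ∀ v, (e :: rest).count v ≤ a.count v) :
    ∀ v, rest.count v ≤ (a.erase e).count v := by
  intro v
  have hc := h v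
  by_cases hv : v = e
  · subst hv
    rw [pvCountEraseSelf]
    simp only [List.count_cons_self] at hc
    omega
  · rw [pvCountEraseNe a v e hv, ← pvCountConsNe rest v e hv]
    exact hc

-- the multiset of entries B minimises over
def pvEntries (c_requis _achats : List Int) : List Int :=
  (PySem.Set.ofList c_requis).map
    (fun k => ((_achats.count k / c_requis.count k : Nat) : Int))

lemma pvAlt_eq (c a : List Int) :
    compter_occurences_costume_alt c a =
      match pvEntries c a with
      | [] => 0
      | x :: xs => xs.foldl min x := by
  show (match (PySem.Dict.counter c).items.map
      (fun p => PySem.Int.floordiv ((PySem.Dict.counter a).getD p.1 0) p.2) with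
    | [] => (0 : Int)
    | x :: xs => xs.foldl min x) = _
  have hm : (PySem.Dict.counter c).items.map
      (fun p => PySem.Int.floordiv ((PySem.Dict.counter a).getD p.1 0) p.2)
      = pvEntries c a := by
    rw [PySem.Dict.items_counter, List.map_map]
    apply List.map_congr_left
    intro k hk
    simp only [Function.comp, PySem.Dict.getD_counter]
    exact_mod_cast PySem.Int.floordiv_natCast (a.count k) (c.count k)
  rw [hm]

lemma pvFoldlMin_mem (x : Int) (xs : List Int) : xs.foldl min x ∈ x :: xs := by
  induction xs generalizing x with
  | nil => simp
  | cons y ys ih =>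
    rw [List.foldl_cons]
    rcases List.mem_cons.1 (ih (min x y)) with h1 | h1
    · rw [h1]
      rcases le_total x y with hxy | hxy
      · simp [min_eq_left hxy]
      · simp [min_eq_right hxy]
    · exact List.mem_cons_of_mem _ (List.mem_cons_of_mem _ h1)

lemma pvFoldlMin_le (x : Int) (xs : List Int) : ∀ y ∈ x :: xs, xs.foldl min x ≤ y := by
  induction xs generalizing x with
  | nil => intro y hy; simp at hy; simp [hy]
  | cons z zs ih =>
    intro y hy
    have hle : zs.foldl min (min x z) ≤ min x z := ih (min x z) _ (List.mem_cons_self)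
    rcases List.mem_cons.1 hy with h1 | h1
    · subst h1
      exact le_trans hle (min_le_left _ _)
    · rcases List.mem_cons.1 h1 with h2 | h2
      · subst h2
        exact le_trans hle (min_le_right _ _)
      · exact ih (min x z) y (List.mem_cons_of_mem _ h2)

lemma pvFoldlMin_sub_one (x : Int) (xs : List Int) :
    (xs.map (fun t => t - 1)).foldl min (x - 1) = xs.foldl min x - 1 := by
  induction xs generalizing x with
  | nil => simp
  | cons y ys ih =>
    simp only [List.map, List.foldl]
    rw [min_sub_sub_right, ih]

-- if the list is nonempty, all entries are ≥ 0 and one entry is 0, the min is 0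
lemma pvFoldlMin_zero (x : Int) (xs : List Int)
    (hnn : ∀ y ∈ x :: xs, 0 ≤ y) (hz : 0 ∈ x :: xs) : xs.foldl min x = 0 := by
  have h1 := pvFoldlMin_le x xs 0 hz
  have h2 := hnn _ (pvFoldlMin_mem x xs)
  omega

-- once res is False the inner for-loop keeps it False
lemma pvRoundA_false (c : List Int) (st : List Int × Bool) (h : st.2 = false) :
    (pvRoundA c st).2 = false := by
  induction c generalizing st with
  | nil => simpa [pvRoundA]
  | cons e rest ih =>
    simp only [pvRoundA, List.foldl]
    split
    · exact ih _ (by simpa using h)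
    · exact ih _ rfl

-- a fully successful round: the state is the sequential erase, res stays True
lemma pvRoundA_success (c : List Int) (a : List Int)
    (h : ∀ v, c.count v ≤ a.count v) :
    pvRoundA c (a, true) = (c.foldl (fun l e => l.erase e) a, true) := by
  induction c generalizing a with
  | nil => simp [pvRoundA]
  | cons e rest ih =>
    have he : e ∈ a := by
      have := h e
      simp only [List.count_cons_self] at this
      exact List.count_pos_iff.1 (by omega)
    have hrest := pvEnoughErase rest a e h
    simp only [pvRoundA, List.foldl] at *
    rw [if_pos (by simpa using he),
      PySem.List.remove?_eq_some_erase a e he]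
    simpa using ih (a.erase e) hrest

-- a failing round: res comes out False
lemma pvRoundA_fail (c : List Int) (a : List Int) (r : Bool)
    (h : ∃ v, a.count v < c.count v) :
    (pvRoundA c (a, r)).2 = false := by
  induction c generalizing a r with
  | nil =>
    obtain ⟨v, hv⟩ := h
    simp at hv
  | cons e rest ih =>
    simp only [pvRoundA, List.foldl]
    by_cases he : a.contains e
    · rw [if_pos he]
      have hem : e ∈ a := by simpa using he
      rw [PySem.List.remove?_eq_some_erase a e hem]
      simp only [Option.getD_some]
      apply ih
      obtain ⟨v, hv⟩ := h
      refine ⟨v, ?_⟩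
      by_cases hve : v = e
      · subst hve
        rw [pvCountEraseSelf]
        simp only [List.count_cons_self] at hv
        have hpos : 0 < a.count v := by
          have := List.count_pos_iff.2 hem
          exact this
        omega
      · rw [pvCountEraseNe a v e hve]
        rw [pvCountConsNe rest v e hve] at hv
        exact hv
    · rw [if_neg he]
      exact pvRoundA_false _ _ rfl

-- counts after a successful round
lemma pvErase_count (c a : List Int) (h : ∀ v, c.count v ≤ a.count v) :
    ∀ v, (c.foldl (fun l e => l.erase e) a).count v = a.count v - c.count v := by
  induction c generalizing a with
  | nil => simp
  | cons e rest ih =>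
    intro v
    have hrest := pvEnoughErase rest a e h
    simp only [List.foldl]
    rw [ih (a.erase e) hrest v]
    have hc := h v
    by_cases hv : v = e
    · subst hv
      rw [pvCountEraseSelf]
      simp only [List.count_cons_self] at hc ⊢
      omega
    · rw [pvCountEraseNe a v e hv, pvCountConsNe rest v e hv]

-- length after a successful round
lemma pvErase_length (c a : List Int) (h : ∀ v, c.count v ≤ a.count v) :
    (c.foldl (fun l e => l.erase e) a).length = a.length - c.length := by
  induction c generalizing a with
  | nil => simp
  | cons e rest ih =>
    have he : e ∈ a := by
      have := h e
      simp only [List.count_cons_self] at this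
      exact List.count_pos_iff.1 (by omega)
    have hrest := pvEnoughErase rest a e h
    simp only [List.foldl]
    rw [ih (a.erase e) hrest, List.length_erase_of_mem he]
    simp
    omega

-- B's value is 0 when the purchases are exhausted for some required item
lemma pvAlt_zero (c a : List Int)
    (h : ∃ v, a.count v < c.count v) :
    compter_occurences_costume_alt c a = 0 := by
  rw [pvAlt_eq]
  obtain ⟨v, hv⟩ := h
  have hvc : v ∈ c := List.count_pos_iff.1 (by omega)
  have hvs : v ∈ PySem.Set.ofList c := (PySem.Set.mem_ofList c v).2 hvc
  have hz : (0 : Int) ∈ pvEntries c a := by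
    have : a.count v / c.count v = 0 := Nat.div_eq_of_lt hv
    refine List.mem_map.2 ⟨v, hvs, ?_⟩
    simp [this]
  have hnn : ∀ y ∈ pvEntries c a, (0 : Int) ≤ y := by
    intro y hy
    obtain ⟨k, _, hk⟩ := List.mem_map.1 hy
    rw [← hk]
    exact Int.natCast_nonneg _
  cases hE : pvEntries c a with
  | nil => simp
  | cons x xs =>
    rw [hE] at hz hnn
    exact pvFoldlMin_zero x xs hnn hz

-- B's value on the empty purchase list is 0
lemma pvAlt_nil (c : List Int) : compter_occurences_costume_alt c [] = 0 := by
  rw [pvAlt_eq]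
  cases hE : pvEntries c [] with
  | nil => simp
  | cons x xs =>
    have hall : ∀ y ∈ x :: xs, y = (0 : Int) := by
      rw [← hE]
      intro y hy
      obtain ⟨k, _, hk⟩ := List.mem_map.1 hy
      simp at hk
      omega
    have := pvFoldlMin_mem x xs
    exact hall _ this

-- B's value drops by exactly 1 after a successful round
lemma pvAlt_succ (c a : List Int) (hc : c ≠ [])
    (h : ∀ v, c.count v ≤ a.count v) :
    compter_occurences_costume_alt c a =
      compter_occurences_costume_alt c (c.foldl (fun l e => l.erase e) a) + 1 := by
  rw [pvAlt_eq, pvAlt_eq]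
  have hmap : pvEntries c (c.foldl (fun l e => l.erase e) a) =
      (pvEntries c a).map (fun t => t - 1) := by
    simp only [pvEntries, List.map_map]
    apply List.map_congr_left
    intro k hk
    have hkc : k ∈ c := (PySem.Set.mem_ofList c k).1 hk
    have hcnt : 1 ≤ c.count k := List.count_pos_iff.2 hkc
    have hak : c.count k ≤ a.count k := h k
    rw [pvErase_count c a h k]
    simp only [Function.comp]
    have hdiv : (a.count k - c.count k) / c.count k = a.count k / c.count k - 1 := by
      conv_rhs => rw [← Nat.sub_add_cancel hak]
      rw [Nat.add_div_right _ (by omega)]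
      simp
    rw [hdiv]
    have hge : 1 ≤ a.count k / c.count k :=
      (Nat.le_div_iff_mul_le (by omega)).2 (by omega)
    push_cast [hge]
    ring
  rw [hmap]
  cases hE : pvEntries c a with
  | nil =>
    exfalso
    obtain ⟨e, he⟩ := List.exists_mem_of_ne_nil c hc
    have : ((a.count e / c.count e : Nat) : Int) ∈ pvEntries c a :=
      List.mem_map.2 ⟨e, (PySem.Set.mem_ofList c e).2 he, rfl⟩
    rw [hE] at this
    simp at this
  | cons x xs =>
    simp only [List.map]
    rw [pvFoldlMin_sub_one]
    ring

-- pvLoopA with res = False returns occ - 1 for every fuel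
lemma pvLoopA_false (c : List Int) (f : Nat) (a : List Int) (occ : Int) :
    pvLoopA c f a false occ = occ - 1 := by
  cases f with
  | zero => simp [pvLoopA]
  | succ f => simp [pvLoopA]

-- the main loop invariant
lemma pvLoopA_main (c : List Int) (hc : c ≠ []) :
    ∀ f a occ, a.length < f →
      pvLoopA c f a true occ = occ + compter_occurences_costume_alt c a := by
  intro f
  induction f with
  | zero => intro a occ h; omega
  | succ f ih =>
    intro a occ hlen
    cases a with
    | nil =>
      simp [pvLoopA, pvAlt_nil]
    | cons b bs =>
      have hpos : 0 < (b :: bs).length := by simp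
      rw [pvLoopA, if_pos ⟨rfl, hpos⟩]
      by_cases h : ∀ v, c.count v ≤ (b :: bs).count v
      · rw [pvRoundA_success c (b :: bs) h]
        have hclen : 1 ≤ c.length := by
          cases c with
          | nil => exact absurd rfl hc
          | cons _ _ => simp
        have hlen' : (c.foldl (fun l e => l.erase e) (b :: bs)).length < f := by
          rw [pvErase_length c (b :: bs) h]
          simp only [List.length_cons] at hlen ⊢
          omega
        rw [ih _ (occ + 1) hlen', pvAlt_succ c (b :: bs) hc h]
        ring
      · push Not at h
        obtain ⟨v, hv⟩ := h
        have hfail := pvRoundA_fail c (b :: bs) true ⟨v, hv⟩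
        have halt := pvAlt_zero c (b :: bs) ⟨v, hv⟩
        rcases hst : pvRoundA c (b :: bs, true) with ⟨a', r'⟩
        rw [hst] at hfail
        simp at hfail
        subst hfail
        rw [pvLoopA_false, halt]
        ring

-- ===== VERDICT (by name: the statement is the Claim_ definition above) =====
theorem compter_occurences_costume_spec : Claim_equal_compter_occurences_costume := by
  intro c a _ hpre
  unfold Spec_compter_occurences_costume compter_occurences_costume
  by_cases hc : c = []
  · subst hc
    rw [hpre rfl]
    decide
  · rw [pvLoopA_main c hc (a.length + 1) a 0 (by omega)]
    ring
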